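-- pv_equiv track=rewrite | github.com/richardxd/advent_of_code | day23/day23.py | smallest_rectangle
-- ===== SOURCE A (Python) =====
-- def smallest_rectangle(elves):
--     '''
--     Given the coordinates of the elves, compute the number of empty grounds of the bounding box
--     '''
--     y_coordinates = [j for i, j in elves]
--     x_coordinates = [i for i, j in elves]
--     min_y = min(y_coordinates)
--     max_y = max(y_coordinates)
--     min_x = min(x_coordinates)
--     max_x = max(x_coordinates)
--     ret = (1 + max_x - min_x) * (1 + max_y - min_y) - len(elves)
--     return ret
-- ===== SOURCE B (Python) =====
-- def smallest_rectangle(elves):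
--     '''
--     Given the coordinates of the elves, compute the number of empty grounds of the bounding box
--     '''
--     xs = sorted(x for x, y in elves)
--     ys = sorted(y for x, y in elves)
--     return (1 + xs[-1] - xs[0]) * (1 + ys[-1] - ys[0]) - len(elves)
-- ===== Notes on version B (the rewrite author's own statement) =====
-- stated objective: alternative
-- what changed: Replaced the four min/max scans by sorting each coordinate axis once and reading the extremes off the first and last elements of the sorted lists.
import Mathlib
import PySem

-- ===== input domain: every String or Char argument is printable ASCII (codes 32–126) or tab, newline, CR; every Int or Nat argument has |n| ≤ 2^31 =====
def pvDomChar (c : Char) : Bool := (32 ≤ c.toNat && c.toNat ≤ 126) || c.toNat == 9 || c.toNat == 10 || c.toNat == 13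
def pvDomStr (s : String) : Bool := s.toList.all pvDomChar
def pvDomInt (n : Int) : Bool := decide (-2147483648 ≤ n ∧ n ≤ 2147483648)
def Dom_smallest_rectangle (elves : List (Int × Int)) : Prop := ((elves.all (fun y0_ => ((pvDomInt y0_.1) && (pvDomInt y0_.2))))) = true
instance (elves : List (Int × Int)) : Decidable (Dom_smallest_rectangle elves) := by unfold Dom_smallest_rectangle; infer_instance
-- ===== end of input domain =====

-- B computes the bounding box by sorting each coordinate axis once and reading the
-- extremes off the ends of the sorted lists, instead of A's four min/max scans
-- (alternative algorithm, not claimed faster).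


-- ===== PORT A =====
-- min()/max() raise ValueError on empty input: PySem.List.min?/max? return none there;
-- the arbitrary 0 in the none-branch is unreachable under Pre_.
def smallest_rectangle (elves : List (Int × Int)) : Int :=
  let y_coordinates := elves.map (fun p => p.2)
  let x_coordinates := elves.map (fun p => p.1)
  match PySem.List.min? y_coordinates (fun v => v), PySem.List.max? y_coordinates (fun v => v),
        PySem.List.min? x_coordinates (fun v => v), PySem.List.max? x_coordinates (fun v => v) with
  | some min_y, some max_y, some min_x, some max_x =>
      (1 + max_x - min_x) * (1 + max_y - min_y) - (elves.length : Int)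
  | _, _, _, _ => 0

-- ===== PORT B =====
-- xs[0] / xs[-1] raise IndexError on the empty list (outside Pre_); in range under Pre_,
-- so pyGetD's default 0 is unreachable there.
def smallest_rectangle_alt (elves : List (Int × Int)) : Int :=
  let xs := PySem.List.sorted (elves.map (fun p => p.1)) (fun v => v) false
  let ys := PySem.List.sorted (elves.map (fun p => p.2)) (fun v => v) false
  (1 + PySem.List.pyGetD xs (-1) 0 - PySem.List.pyGetD xs 0 0) *
    (1 + PySem.List.pyGetD ys (-1) 0 - PySem.List.pyGetD ys 0 0) - (elves.length : Int)

-- ===== PRECONDITION & SPEC =====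
-- Pre_ excludes the empty list, on which A raises ValueError (min of empty sequence)
-- and B raises IndexError (xs[-1] on the empty list).
def Pre_smallest_rectangle (elves : List (Int × Int)) : Prop := elves ≠ []
instance (elves : List (Int × Int)) : Decidable (Pre_smallest_rectangle elves) := by unfold Pre_smallest_rectangle; infer_instance
def pvWitness_smallest_rectangle : (List (Int × Int)) := [(0, 0)]

def Spec_smallest_rectangle (elves : List (Int × Int)) (out : Int) : Prop := out = smallest_rectangle_alt elves
instance (elves : List (Int × Int)) (out : Int) : Decidable (Spec_smallest_rectangle elves out) := by unfold Spec_smallest_rectangle; infer_instance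

-- ===== CLAIM =====
def Claim_equal_smallest_rectangle : Prop := ∀ (elves : List (Int × Int)), Dom_smallest_rectangle elves → Pre_smallest_rectangle elves → Spec_smallest_rectangle elves (smallest_rectangle elves)

-- ===== LEMMAS AND PROOFS =====

-- in a ≤-sorted list, the last element is an upper bound
theorem pairwise_le_getLast (l : List Int) (h : l ≠ []) (hp : l.Pairwise (· ≤ ·)) :
    ∀ y ∈ l, y ≤ l.getLast h := by
  induction l with
  | nil => exact absurd rfl h
  | cons a t ih =>
    intro y hy
    cases t with
    | nil => simp_all
    | cons b t' =>
      rcases List.mem_cons.mp hy with rfl | hyt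
      · rw [List.getLast_cons (by simp)]
        exact List.rel_of_pairwise_cons hp (List.getLast_mem (by simp))
      · rw [List.getLast_cons (by simp)]
        exact ih (by simp) hp.of_cons y hyt

-- head and last of sorted (x :: l) are the running min / max of x over l
theorem sorted_head_eq_min (x : Int) (l : List Int) :
    PySem.List.pyGetD (PySem.List.sorted (x :: l) (fun v => v) false) 0 0 = l.foldl min x := by
  have hperm := PySem.List.sorted_perm (x :: l) (fun v => v) false
  have hne : PySem.List.sorted (x :: l) (fun v => v) false ≠ [] := by
    intro h0; have := hperm.length_eq; simp [h0] at this
  obtain ⟨m, t', hs⟩ := List.exists_cons_of_ne_nil hne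
  have hmmem : m ∈ x :: l := hperm.mem_iff.mp (hs ▸ List.mem_cons_self)
  have hmin := PySem.List.foldl_min_le l x
  have hflmem : l.foldl min x ∈ x :: l := by
    rcases PySem.List.foldl_min_mem l x with h | h
    · rw [h]; exact List.mem_cons_self
    · exact List.mem_cons_of_mem _ h
  have hlow := PySem.List.key_head_sorted_le (xs := x :: l) (key := fun v => v) hs
  rw [hs, PySem.List.pyGetD_zero_cons]
  refine le_antisymm (hlow _ hflmem) ?_
  rcases List.mem_cons.mp hmmem with rfl | h
  · exact hmin.1
  · exact hmin.2 m h

theorem sorted_last_eq_max (x : Int) (l : List Int) :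
    PySem.List.pyGetD (PySem.List.sorted (x :: l) (fun v => v) false) (-1) 0 = l.foldl max x := by
  have hperm := PySem.List.sorted_perm (x :: l) (fun v => v) false
  have hne : PySem.List.sorted (x :: l) (fun v => v) false ≠ [] := by
    intro h0; have := hperm.length_eq; simp [h0] at this
  have hpw : (PySem.List.sorted (x :: l) (fun v => v) false).Pairwise (· ≤ ·) := by
    have := PySem.List.sorted_pairwise (xs := x :: l) (key := fun v => v)
    simpa using this
  have hlastmem : (PySem.List.sorted (x :: l) (fun v => v) false).getLast hne ∈ x :: l :=
    hperm.mem_iff.mp (List.getLast_mem hne)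
  have hmax := PySem.List.le_foldl_max l x
  have hflmem : l.foldl max x ∈ x :: l := by
    rcases PySem.List.foldl_max_mem l x with h | h
    · rw [h]; exact List.mem_cons_self
    · exact List.mem_cons_of_mem _ h
  rw [PySem.List.pyGetD_neg_one _ 0 hne]
  refine le_antisymm ?_ (pairwise_le_getLast _ hne hpw _ (hperm.mem_iff.mpr hflmem))
  rcases List.mem_cons.mp hlastmem with h | h
  · rw [h]; exact hmax.1
  · exact hmax.2 _ h

-- ===== VERDICT =====
theorem smallest_rectangle_spec : Claim_equal_smallest_rectangle := by
  intro elves _ hpre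
  unfold Spec_smallest_rectangle
  match elves with
  | [] => exact absurd rfl hpre
  | e :: t =>
    simp only [smallest_rectangle, smallest_rectangle_alt, List.map_cons,
      PySem.List.min?_id_cons, PySem.List.max?_id_cons,
      sorted_head_eq_min, sorted_last_eq_max]
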